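-- pv_equiv track=rewrite | github.com/BhallaLab/moose-core | tests/python/neuroml/count.py | locate_spike_in_spike_train
-- ===== SOURCE A (Python) =====
-- def locate_spike_in_spike_train( vector, threshold ):
--     """Return a list of instance where a spike has occured in vector """
--
--     nSpikes = 0
--     spikeBegin, spikeEnds = False, False
--     spikeList = []
--     for i, x in enumerate(vector):
--         if x > threshold:
--             if not spikeBegin:
--                 spikeBegin, spikeEnds = True, False
--             else: pass
--         else:
--             if spikeBegin:
--                 spikeEnds, spikeBegin = True, False
--                 spikeList.append(i)
--                 nSpikes += 1
--     return nSpikes, spikeList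
-- ===== SOURCE B (Python) =====
-- def _runs(vector, threshold):
--     """Run-length encode the above-threshold pattern of vector: (above?, run length) pairs."""
--     runs = []
--     i, n = 0, len(vector)
--     while i < n:
--         above = vector[i] > threshold
--         j = i + 1
--         while j < n and (vector[j] > threshold) == above:
--             j += 1
--         runs.append((above, j - i))
--         i = j
--     return runs
--
-- def locate_spike_in_spike_train(vector, threshold):
--     """Return a list of instance where a spike has occured in vector """
--     spikeList = []
--     pos = 0
--     for above, length in _runs(vector, threshold)[:-1]:
--         pos += length
--         if above:
--             spikeList.append(pos)
--     return len(spikeList), spikeList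
-- ===== Notes on version B (the rewrite author's own statement) =====
-- stated objective: alternative
-- what changed: Replaces A's one-pass spikeBegin/spikeEnds flag machine with two stages: first run-length encode the above-threshold pattern into (above, length) runs, then prefix-sum the lengths of all runs but the last, recording the cumulative position after each above run as a spike end.
import Mathlib
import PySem

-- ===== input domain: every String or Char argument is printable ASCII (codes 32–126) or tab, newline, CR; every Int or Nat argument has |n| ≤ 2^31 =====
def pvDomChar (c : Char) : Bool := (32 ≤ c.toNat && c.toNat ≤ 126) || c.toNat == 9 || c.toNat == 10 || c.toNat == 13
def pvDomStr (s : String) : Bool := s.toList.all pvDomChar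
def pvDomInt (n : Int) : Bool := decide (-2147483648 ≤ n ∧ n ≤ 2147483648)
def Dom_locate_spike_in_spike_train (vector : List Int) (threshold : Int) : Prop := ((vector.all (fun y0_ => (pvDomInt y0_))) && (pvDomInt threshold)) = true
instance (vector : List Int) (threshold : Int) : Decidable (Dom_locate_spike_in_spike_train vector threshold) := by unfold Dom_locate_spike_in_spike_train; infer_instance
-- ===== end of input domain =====

-- B replaces A's one-pass spikeBegin/spikeEnds flag machine with two stages:
-- run-length encode the above-threshold pattern, then prefix-sum the run lengths
-- (all runs but the last), recording the position after each above run (alternative).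

-- ===== PORT A =====
-- literal transliteration of A: one fold over enumerate(vector) carrying (nSpikes, spikeBegin, spikeEnds, spikeList)
def locate_spike_in_spike_train (vector : List Int) (threshold : Int) : Int × List Int :=
  let st := (PySem.List.enumerate vector 0).foldl
    (fun (s : Int × Bool × Bool × List Int) (p : Int × Int) =>
      if p.2 > threshold then
        if !s.2.1 then (s.1, true, false, s.2.2.2) else s
      else
        if s.2.1 then (s.1 + 1, false, true, s.2.2.2 ++ [p.1]) else s)
    (0, false, false, [])
  (st.1, st.2.2.2)

-- ===== PORT B =====
-- inner while loop of _runs: advance j while j < n and (vector[j] > threshold) == above.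
-- vector[j] is accessed only under the guard j < n, so getD is exact there.
def pvRunEnd (vector : List Int) (threshold : Int) (above : Bool) (j : Nat) : Nat :=
  if h : j < vector.length ∧ decide (vector.getD j 0 > threshold) = above then
    pvRunEnd vector threshold above (j + 1)
  else j
termination_by vector.length - j
decreasing_by omega

-- needed only for the termination of pvRuns (cited in its decreasing_by)
lemma pvRunEnd_ge (vector : List Int) (threshold : Int) (above : Bool) (j : Nat) :
    j ≤ pvRunEnd vector threshold above j := by
  have H : ∀ (k j : Nat), vector.length - j ≤ k → j ≤ pvRunEnd vector threshold above j := by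
    intro k
    induction k with
    | zero =>
      intro j hj
      unfold pvRunEnd
      split_ifs with h
      · omega
      · exact le_rfl
    | succ k ih =>
      intro j hj
      unfold pvRunEnd
      split_ifs with h
      · have := ih (j + 1) (by omega); omega
      · exact le_rfl
  exact H _ j le_rfl

-- outer while loop of _runs: collect (above, run length) pairs from index i on
def pvRuns (vector : List Int) (threshold : Int) (i : Nat) : List (Bool × Int) :=
  if h : i < vector.length then
    let above := decide (vector.getD i 0 > threshold)
    let j := pvRunEnd vector threshold above (i + 1)
    (above, (j : Int) - (i : Int)) :: pvRuns vector threshold j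
  else []
termination_by vector.length - i
decreasing_by
  have := pvRunEnd_ge vector threshold (decide (vector.getD i 0 > threshold)) (i + 1)
  omega

-- literal transliteration of B: runs = _runs(vector, threshold); loop over runs[:-1]
-- accumulating pos and appending pos after each above run
def locate_spike_in_spike_train_alt (vector : List Int) (threshold : Int) : Int × List Int :=
  let runs := pvRuns vector threshold 0
  let st := (PySem.List.slice runs none (some (-1))).foldl
    (fun (s : Int × List Int) (r : Bool × Int) =>
      let pos := s.1 + r.2
      if r.1 then (pos, s.2 ++ [pos]) else (pos, s.2))
    (0, [])
  ((st.2.length : Int), st.2)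

-- ===== PRECONDITION & SPEC =====
def Spec_locate_spike_in_spike_train (vector : List Int) (threshold : Int) (out : Int × List Int) : Prop := out = locate_spike_in_spike_train_alt vector threshold
instance (vector : List Int) (threshold : Int) (out : Int × List Int) : Decidable (Spec_locate_spike_in_spike_train vector threshold out) := by unfold Spec_locate_spike_in_spike_train; infer_instance

-- ===== CLAIM (what is proved, stated in full; the proofs are below) =====
def Claim_equal_locate_spike_in_spike_train : Prop := ∀ (vector : List Int) (threshold : Int), Dom_locate_spike_in_spike_train vector threshold → Spec_locate_spike_in_spike_train vector threshold (locate_spike_in_spike_train vector threshold)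

-- ===== LEMMAS AND PROOFS =====

-- falling-edge indices of l, where k is the index of l's head and b says whether the
-- element just before l's head exceeded t
def edges (t : Int) : Int → Bool → List Int → List Int
  | _, _, [] => []
  | k, b, x :: xs =>
    if x > t then edges t (k+1) true xs
    else if b then k :: edges t (k+1) false xs
    else edges t (k+1) false xs

lemma A_loop (t : Int) (l : List Int) : ∀ (k n : Int) (b e : Bool) (acc : List Int),
    ((PySem.List.enumerate l k).foldl
      (fun (s : Int × Bool × Bool × List Int) (p : Int × Int) =>
        if p.2 > t then
          if !s.2.1 then (s.1, true, false, s.2.2.2) else s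
        else
          if s.2.1 then (s.1 + 1, false, true, s.2.2.2 ++ [p.1]) else s)
      (n, b, e, acc)).1 = n + ((edges t k b l).length : Int) ∧
    ((PySem.List.enumerate l k).foldl
      (fun (s : Int × Bool × Bool × List Int) (p : Int × Int) =>
        if p.2 > t then
          if !s.2.1 then (s.1, true, false, s.2.2.2) else s
        else
          if s.2.1 then (s.1 + 1, false, true, s.2.2.2 ++ [p.1]) else s)
      (n, b, e, acc)).2.2.2 = acc ++ edges t k b l := by
  induction l with
  | nil => intro k n b e acc; simp [PySem.List.enumerate_nil, edges]
  | cons x xs ih =>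
    intro k n b e acc
    rw [PySem.List.enumerate_cons, List.foldl_cons]
    by_cases hx : x > t
    · cases b with
      | false =>
        rw [if_pos hx]
        simp only [edges, if_pos hx, Bool.not_false, reduceIte]
        exact ih (k+1) n true false acc
      | true =>
        rw [if_pos hx]
        simp only [edges, if_pos hx, Bool.not_true, reduceIte]
        exact ih (k+1) n true e acc
    · cases b with
      | false =>
        rw [if_neg hx]
        simp only [edges, if_neg hx]
        exact ih (k+1) n false e acc
      | true =>
        rw [if_neg hx]
        simp only [edges, if_neg hx, reduceIte]
        obtain ⟨h1, h2⟩ := ih (k+1) (n+1) false true (acc ++ [k])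
        refine ⟨?_, ?_⟩
        · rw [h1]; simp [List.length_cons]; ring
        · rw [h2]; simp

-- list-level mirror of the inner while loop: length of the prefix of xs on which
-- (· > t) keeps the value a
def runLenL (t : Int) (a : Bool) : List Int → Nat
  | [] => 0
  | y :: ys => if decide (y > t) = a then runLenL t a ys + 1 else 0

-- list-level mirror of _runs
def runsL (t : Int) : List Int → List (Bool × Int)
  | [] => []
  | x :: xs =>
    let a := decide (x > t)
    let m := runLenL t a xs
    (a, (m : Int) + 1) :: runsL t (xs.drop m)
termination_by seg => seg.length
decreasing_by simp only [List.length_cons, List.length_drop]; omega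

-- B's second stage as a recursion over the run list
def spikes (p : Int) : List (Bool × Int) → List Int
  | [] => []
  | [_] => []
  | r :: s :: rest => (if r.1 then [p + r.2] else []) ++ spikes (p + r.2) (s :: rest)

lemma pvRunEnd_eq (vector : List Int) (t : Int) (a : Bool) : ∀ (j : Nat),
    pvRunEnd vector t a j = j + runLenL t a (vector.drop j) := by
  have H : ∀ (k j : Nat), vector.length - j ≤ k →
      pvRunEnd vector t a j = j + runLenL t a (vector.drop j) := by
    intro k
    induction k with
    | zero =>
      intro j hj
      unfold pvRunEnd
      split_ifs with h
      · omega
      · rw [List.drop_eq_nil_of_le (by omega)]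
        simp [runLenL]
    | succ k ih =>
      intro j hj
      unfold pvRunEnd
      split_ifs with h
      · obtain ⟨hlt, ha⟩ := h
        rw [ih (j + 1) (by omega), List.drop_eq_getElem_cons hlt]
        rw [List.getD_eq_getElem vector 0 hlt] at ha
        have hr : runLenL t a (vector[j] :: vector.drop (j + 1))
            = runLenL t a (vector.drop (j + 1)) + 1 := by
          simp [runLenL, ha]
        rw [hr]
        omega
      · by_cases hlt : j < vector.length
        · have ha : decide (vector.getD j 0 > t) ≠ a := by tauto
          rw [List.drop_eq_getElem_cons hlt]
          rw [List.getD_eq_getElem vector 0 hlt] at ha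
          simp [runLenL, ha]
        · rw [List.drop_eq_nil_of_le (by omega)]
          simp [runLenL]
  exact fun j => H _ j le_rfl

lemma pvRuns_eq (vector : List Int) (t : Int) : ∀ (i : Nat),
    pvRuns vector t i = runsL t (vector.drop i) := by
  have H : ∀ (k i : Nat), vector.length - i ≤ k →
      pvRuns vector t i = runsL t (vector.drop i) := by
    intro k
    induction k with
    | zero =>
      intro i hi
      unfold pvRuns
      split_ifs with h
      · omega
      · rw [List.drop_eq_nil_of_le (by omega)]
        simp [runsL]
    | succ k ih =>
      intro i hi
      unfold pvRuns
      split_ifs with h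
      · rw [List.drop_eq_getElem_cons h, List.getD_eq_getElem vector 0 h]
        simp only [runsL]
        have he := pvRunEnd_eq vector t (decide (vector[i] > t)) (i + 1)
        have hge := pvRunEnd_ge vector t (decide (vector[i] > t)) (i + 1)
        set m := runLenL t (decide (vector[i] > t)) (vector.drop (i + 1)) with hm
        have hhead : ((i + 1 + m : Nat) : Int) - (i : Int) = (m : Int) + 1 := by
          push_cast; ring
        have hdrop : List.drop m (List.drop (i + 1) vector) = List.drop (i + 1 + m) vector := by
          rw [List.drop_drop]
        rw [he, hhead, hdrop]
        exact congrArg (List.cons _) (ih (i + 1 + m) (by omega))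
      · rw [List.drop_eq_nil_of_le (by omega)]
        simp [runsL]
  exact fun i => H _ i le_rfl

-- skipping a whole run does not change the edge list when the incoming flag equals the run's value
lemma edges_skip_run (t : Int) (a : Bool) : ∀ (xs : List Int) (p : Int),
    edges t p a xs = edges t (p + (runLenL t a xs : Int)) a (xs.drop (runLenL t a xs)) := by
  intro xs
  induction xs with
  | nil => intro p; simp [runLenL]
  | cons y ys ih =>
    intro p
    by_cases hy : decide (y > t) = a
    · have : edges t p a (y :: ys) = edges t (p + 1) a ys := by
        cases a with
        | true => simp only [edges, if_pos (of_decide_eq_true hy)]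
        | false =>
          have hny : ¬ (y > t) := of_decide_eq_false hy
          simp [edges, hny]
      rw [this, ih (p + 1)]
      simp only [runLenL, hy, if_pos rfl, List.drop_succ_cons]
      congr 1
      push_cast
      ring
    · simp [runLenL, hy]

-- the first element after a maximal run flips the comparison flag
lemma runLenL_stop (t : Int) (a : Bool) : ∀ (xs : List Int) (y : Int) (ys : List Int),
    xs.drop (runLenL t a xs) = y :: ys → decide (y > t) = !a := by
  intro xs
  induction xs with
  | nil => intro y ys h; simp [runLenL] at h
  | cons z zs ih =>
    intro y ys h
    by_cases hz : decide (z > t) = a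
    · simp only [runLenL, hz, if_pos rfl, List.drop_succ_cons] at h
      exact ih y ys h
    · simp only [runLenL, hz, if_neg hz, List.drop_zero] at h
      cases h
      cases a <;> simp_all

-- prepending the incoming flag as an explicit edge
lemma edges_head (t y : Int) (ys : List Int) (q : Int) (b : Bool) :
    edges t q b (y :: ys) =
      (if b = true ∧ decide (y > t) = false then [q] else []) ++ edges t q false (y :: ys) := by
  by_cases hy : y > t <;> cases b <;> simp [edges, hy]

lemma runsL_ne_nil (t : Int) (seg : List Int) (h : seg ≠ []) : runsL t seg ≠ [] := by
  cases seg with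
  | nil => exact absurd rfl h
  | cons x xs => simp [runsL]

-- the core correspondence: A's falling-edge list = B's run-based spike list
lemma edges_eq_spikes (t : Int) : ∀ (seg : List Int) (p : Int),
    edges t p false seg = spikes p (runsL t seg) := by
  have H : ∀ (k : Nat) (seg : List Int), seg.length ≤ k → ∀ (p : Int),
      edges t p false seg = spikes p (runsL t seg) := by
    intro k
    induction k with
    | zero =>
      intro seg hseg p
      have : seg = [] := List.eq_nil_of_length_eq_zero (by omega)
      subst this
      simp [edges, runsL, spikes]
    | succ k ih =>
      intro seg hseg p
      cases seg with
      | nil => simp [edges, runsL, spikes]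
      | cons x xs =>
        have hstep : edges t p false (x :: xs) = edges t (p + 1) (decide (x > t)) xs := by
          by_cases hx : x > t <;> simp [edges, hx]
        obtain ⟨a, ha⟩ : ∃ a, decide (x > t) = a := ⟨_, rfl⟩
        obtain ⟨m, hm⟩ : ∃ m, runLenL t a xs = m := ⟨_, rfl⟩
        have hruns : runsL t (x :: xs) = (a, (m : Int) + 1) :: runsL t (xs.drop m) := by
          simp only [runsL, ha, hm]
        have hskip := edges_skip_run t a xs (p + 1)
        rw [hm] at hskip
        rw [hstep, ha, hskip, hruns]
        cases hrest : xs.drop m with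
        | nil =>
          simp [edges, runsL, spikes]
        | cons y ys =>
          have hy : decide (y > t) = !a := runLenL_stop t a xs y ys (by rw [hm]; exact hrest)
          have hlen : (y :: ys).length ≤ k := by
            have hd : (xs.drop m).length = xs.length - m := List.length_drop
            rw [hrest] at hd
            simp only [List.length_cons] at hseg hd ⊢
            omega
          rw [edges_head t y ys (p + 1 + (m : Int)) a, hy,
            ih (y :: ys) hlen (p + 1 + (m : Int))]
          cases hr : runsL t (y :: ys) with
          | nil => exact absurd hr (runsL_ne_nil t _ (by simp))
          | cons r rs =>
            simp only [spikes]
            have harith : p + ((m : Int) + 1) = p + 1 + (m : Int) := by ring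
            rw [harith]
            cases a <;> simp
  exact fun seg p => H seg.length seg le_rfl p

-- the fold over runs[:-1] computes spikes
lemma foldl_dropLast_spikes : ∀ (runs : List (Bool × Int)) (p : Int) (acc : List Int),
    ((runs.dropLast).foldl
      (fun (s : Int × List Int) (r : Bool × Int) =>
        let pos := s.1 + r.2
        if r.1 then (pos, s.2 ++ [pos]) else (pos, s.2))
      (p, acc)).2 = acc ++ spikes p runs := by
  intro runs
  induction runs with
  | nil => intro p acc; simp [spikes]
  | cons r rest ih =>
    intro p acc
    obtain ⟨b, ln⟩ := r
    cases rest with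
    | nil => simp [spikes]
    | cons s rs =>
      rw [List.dropLast_cons₂, List.foldl_cons]
      cases b with
      | true => exact (ih (p + ln) (acc ++ [p + ln])).trans (by simp [spikes])
      | false => exact (ih (p + ln) acc).trans (by simp [spikes])

-- ===== VERDICT (by name: the statement is the Claim_ definition above) =====
theorem locate_spike_in_spike_train_spec : Claim_equal_locate_spike_in_spike_train := by
  intro vector threshold _
  unfold Spec_locate_spike_in_spike_train
  simp only [locate_spike_in_spike_train, locate_spike_in_spike_train_alt]
  obtain ⟨h1, h2⟩ := A_loop threshold vector 0 0 false false []
  rw [pvRuns_eq vector threshold 0, List.drop_zero, PySem.List.slice_to_neg_one,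
    foldl_dropLast_spikes (runsL threshold vector) 0 []]
  rw [← edges_eq_spikes threshold vector 0]
  rw [Prod.ext_iff]
  refine ⟨?_, ?_⟩
  · rw [h1]
    simp
  · rw [h2]
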